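-- pv_equiv track=rewrite | github.com/srsuveer1807/DNA_DATA_STORAGE | decoder.py | recover_length_from_header
-- ===== SOURCE A (Python) =====
-- DNA_REVERSE_MAP = {"A": "00", "T": "01", "G": "10", "C": "11"}
--
-- def _dna_to_binary(dna: str) -> str:
--     return "".join(DNA_REVERSE_MAP.get(b, "") for b in dna)
--
-- def recover_length_from_header(header_bases: str) -> int:
--     """
--     header_bases should be first 24 bases (48 bits). Returns integer length (chars).
--     Majority-vote across the three repeated 16-bit fields.
--     """
--     header_bases = (header_bases or "").ljust(24, "A")[:24]
--     bits48 = _dna_to_binary(header_bases)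
--     bits48 = bits48.ljust(48, "0")[:48]
--     parts = [bits48[0:16], bits48[16:32], bits48[32:48]]
--     recovered_bits = []
--     for i in range(16):
--         column = [p[i] for p in parts]
--         recovered_bits.append("1" if column.count("1") >= 2 else "0")
--     return int("".join(recovered_bits), 2)
-- ===== SOURCE B (Python) =====
-- DNA_REVERSE_MAP = {"A": "00", "T": "01", "G": "10", "C": "11"}
--
-- def _dna_to_binary(dna: str) -> str:
--     return "".join(DNA_REVERSE_MAP.get(b, "") for b in dna)
--
-- def recover_length_from_header(header_bases: str) -> int:
--     # Same normalization as the original, then bitwise closed-form majority.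
--     header_bases = (header_bases or "").ljust(24, "A")[:24]
--     bits48 = _dna_to_binary(header_bases).ljust(48, "0")[:48]
--     x = int(bits48[0:16], 2)
--     y = int(bits48[16:32], 2)
--     z = int(bits48[32:48], 2)
--     return (x & y) | (y & z) | (x & z)
-- ===== Notes on version B (the rewrite author's own statement) =====
-- stated objective: alternative
-- what changed: A's per-bit majority loop (building the three column lists, counting '1's per column, joining a bit string and parsing it) is replaced by converting the three 16-bit slices to integers once and returning the closed-form bitwise majority (x & y) | (y & z) | (x & z).
import Mathlib
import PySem

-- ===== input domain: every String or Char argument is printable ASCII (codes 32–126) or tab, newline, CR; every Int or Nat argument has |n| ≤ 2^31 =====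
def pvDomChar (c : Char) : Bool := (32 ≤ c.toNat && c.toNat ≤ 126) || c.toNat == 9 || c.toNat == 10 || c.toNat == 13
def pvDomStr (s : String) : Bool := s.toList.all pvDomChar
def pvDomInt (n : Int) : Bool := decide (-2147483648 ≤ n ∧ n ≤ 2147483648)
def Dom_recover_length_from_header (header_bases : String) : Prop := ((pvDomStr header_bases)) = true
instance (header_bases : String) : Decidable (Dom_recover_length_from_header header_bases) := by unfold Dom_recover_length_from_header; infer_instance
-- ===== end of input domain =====

-- B replaces A's per-bit majority loop (column lists, counting, string re-joining) by three 16-bit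
-- integer conversions and one closed-form bitwise majority (x&y)|(y&z)|(x&z); objective: alternative.

-- ===== PORT A =====
def DNA_REVERSE_MAP : PySem.Dict Char (List Char) :=
  ((((PySem.Dict.empty).insert 'A' ['0', '0']).insert 'T' ['0', '1']).insert 'G' ['1', '0']).insert 'C' ['1', '1']

-- "".join(DNA_REVERSE_MAP.get(b, "") for b in dna): join with empty separator = flatten
def dna_to_binary (dna : List Char) : List Char :=
  (dna.map (fun b => DNA_REVERSE_MAP.getD b [])).flatten

-- s.ljust(n, c)[:n], ported by hand (exact: ljust pads on the right to length n, then we take n)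
def ljustTake (cs : List Char) (n : Nat) (c : Char) : List Char :=
  (cs ++ List.replicate (n - cs.length) c).take n

-- int(s, 2) ported by hand for nonempty strings of '0'/'1' digits — all that ever reaches it here (exact there)
def int2 (cs : List Char) : Int :=
  cs.foldl (fun acc c => acc * 2 + (if c = '1' then 1 else 0)) 0

def recover_length_from_header (header_bases : String) : Int :=
  -- '(header_bases or "")' is the identity on the underlying character list
  let hb := ljustTake header_bases.toList 24 'A'
  let bits48 := ljustTake (dna_to_binary hb) 48 '0'
  let parts := [PySem.List.slice bits48 (some 0) (some 16),
                PySem.List.slice bits48 (some 16) (some 32),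
                PySem.List.slice bits48 (some 32) (some 48)]
  let recovered_bits := (PySem.List.pyRange 0 16 1).foldl (fun acc i =>
      -- p[i]: index i ∈ [0,16) is always in range (each part has 16 chars), so pyGetD is exact
      let column := parts.map (fun p => PySem.List.pyGetD p i ' ')
      acc ++ [if 2 ≤ column.count '1' then '1' else '0']) ([] : List Char)
  int2 recovered_bits

-- ===== PORT B =====
-- Python's '&' / '|' on ints, ported by hand for the nonnegative operands reached here (exact there)
def pyIntAnd (x y : Int) : Int := Int.ofNat (Nat.land x.toNat y.toNat)
def pyIntOr (x y : Int) : Int := Int.ofNat (Nat.lor x.toNat y.toNat)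

def recover_length_from_header_alt (header_bases : String) : Int :=
  let hb := ljustTake header_bases.toList 24 'A'
  let bits48 := ljustTake (dna_to_binary hb) 48 '0'
  let x := int2 (PySem.List.slice bits48 (some 0) (some 16))
  let y := int2 (PySem.List.slice bits48 (some 16) (some 32))
  let z := int2 (PySem.List.slice bits48 (some 32) (some 48))
  -- (x & y) | (y & z) | (x & z)
  pyIntOr (pyIntOr (pyIntAnd x y) (pyIntAnd y z)) (pyIntAnd x z)

-- ===== PRECONDITION & SPEC =====
def Spec_recover_length_from_header (header_bases : String) (out : Int) : Prop := out = recover_length_from_header_alt header_bases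
instance (header_bases : String) (out : Int) : Decidable (Spec_recover_length_from_header header_bases out) := by unfold Spec_recover_length_from_header; infer_instance

-- ===== CLAIM (what is proved, stated in full; the proofs are below) =====
def Claim_equal_recover_length_from_header : Prop := ∀ (header_bases : String), Dom_recover_length_from_header header_bases → Spec_recover_length_from_header header_bases (recover_length_from_header header_bases)

-- ===== LEMMAS AND PROOFS =====

def dig (c : Char) : Nat := if c = '1' then 1 else 0

def nval (cs : List Char) : Nat := cs.foldl (fun a c => a * 2 + dig c) 0

def majc (a b c : Char) : Char := if 2 ≤ ([a, b, c].count '1') then '1' else '0'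

def M (x y z : Nat) : Nat := ((x &&& y) ||| (y &&& z)) ||| (x &&& z)

lemma dig_le_one (c : Char) : dig c ≤ 1 := by
  unfold dig; split_ifs <;> omega

lemma int2_acc : ∀ (cs : List Char) (a : Nat),
    cs.foldl (fun acc c => acc * 2 + (if c = '1' then 1 else 0)) (a : Int)
      = ((cs.foldl (fun x c => x * 2 + dig c) a : Nat) : Int) := by
  intro cs
  induction cs with
  | nil => intro a; simp
  | cons c t ih =>
    intro a
    have h : (a : Int) * 2 + (if c = '1' then 1 else 0) = ((a * 2 + dig c : Nat) : Int) := by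
      unfold dig; split_ifs <;> push_cast <;> ring
    simp only [List.foldl_cons, h, ih]

lemma int2_eq_nval (cs : List Char) : int2 cs = (nval cs : Nat) := by
  unfold int2 nval
  have := int2_acc cs 0
  simpa using this

lemma nval_acc : ∀ (cs : List Char) (a : Nat),
    cs.foldl (fun x c => x * 2 + dig c) a = a * 2 ^ cs.length + nval cs := by
  intro cs
  induction cs with
  | nil => intro a; simp [nval]
  | cons c t ih =>
    intro a
    have h1 := ih (a * 2 + dig c)
    have h2 := ih (dig c)
    have hnv : nval (c :: t) = dig c * 2 ^ t.length + nval t := by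
      unfold nval; simp only [List.foldl_cons]
      simpa using h2
    simp only [List.foldl_cons, h1, hnv, List.length_cons]
    ring

lemma nval_cons (c : Char) (t : List Char) :
    nval (c :: t) = dig c * 2 ^ t.length + nval t := by
  unfold nval
  simp only [List.foldl_cons]
  simpa using nval_acc t (dig c)

lemma nval_lt (cs : List Char) : nval cs < 2 ^ cs.length := by
  induction cs with
  | nil => simp [nval]
  | cons c t ih =>
    rw [nval_cons]
    have h1 : dig c * 2 ^ t.length ≤ 1 * 2 ^ t.length :=
      Nat.mul_le_mul_right _ (dig_le_one c)
    simp only [List.length_cons, pow_succ]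
    omega

lemma land_split {n a b p q : Nat} (hp : p < 2 ^ n) (hq : q < 2 ^ n) :
    (a * 2 ^ n + p) &&& (b * 2 ^ n + q) = (a &&& b) * 2 ^ n + (p &&& q) := by
  apply Nat.eq_of_testBit_eq
  intro i
  rw [Nat.testBit_and, Nat.mul_comm a, Nat.mul_comm b, Nat.mul_comm (a &&& b),
      Nat.testBit_two_pow_mul_add _ hp, Nat.testBit_two_pow_mul_add _ hq,
      Nat.testBit_two_pow_mul_add _ (Nat.and_lt_two_pow _ hq)]
  split_ifs <;> simp [Nat.testBit_and]

lemma lor_split {n a b p q : Nat} (hp : p < 2 ^ n) (hq : q < 2 ^ n) :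
    (a * 2 ^ n + p) ||| (b * 2 ^ n + q) = (a ||| b) * 2 ^ n + (p ||| q) := by
  apply Nat.eq_of_testBit_eq
  intro i
  rw [Nat.testBit_or, Nat.mul_comm a, Nat.mul_comm b, Nat.mul_comm (a ||| b),
      Nat.testBit_two_pow_mul_add _ hp, Nat.testBit_two_pow_mul_add _ hq,
      Nat.testBit_two_pow_mul_add _ (Nat.or_lt_two_pow hp hq)]
  split_ifs <;> simp [Nat.testBit_or]

lemma maj_split {n a b c p q r : Nat} (hp : p < 2 ^ n) (hq : q < 2 ^ n) (hr : r < 2 ^ n) :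
    M (a * 2 ^ n + p) (b * 2 ^ n + q) (c * 2 ^ n + r) = M a b c * 2 ^ n + M p q r := by
  unfold M
  rw [land_split hp hq, land_split hq hr, land_split hp hr,
      lor_split (Nat.and_lt_two_pow _ hq) (Nat.and_lt_two_pow _ hr),
      lor_split (Nat.or_lt_two_pow (Nat.and_lt_two_pow _ hq) (Nat.and_lt_two_pow _ hr))
        (Nat.and_lt_two_pow _ hr)]

lemma dig_majc (a b c : Char) : dig (majc a b c) = M (dig a) (dig b) (dig c) := by
  unfold majc dig M
  by_cases h1 : a = '1' <;> by_cases h2 : b = '1' <;> by_cases h3 : c = '1' <;>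
    simp [h1, h2, h3]

lemma map_range_eq_zipWith3 : ∀ (n : Nat) (p q r : List Char),
    p.length = n → q.length = n → r.length = n →
    (List.range n).map (fun k => majc (p.getD k ' ') (q.getD k ' ') (r.getD k ' '))
      = List.zipWith3 majc p q r := by
  intro n
  induction n with
  | zero =>
    intro p q r hp hq hr
    rw [List.length_eq_zero_iff] at hp hq hr
    subst hp; subst hq; subst hr
    simp [List.zipWith3]
  | succ n ih =>
    intro p q r hp hq hr
    cases p with
    | nil => simp at hp
    | cons a p =>
      cases q with
      | nil => simp at hq
      | cons b q =>
        cases r with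
        | nil => simp at hr
        | cons c r =>
          simp only [List.length_cons, Nat.add_right_cancel_iff] at hp hq hr
          simp only [List.range_succ_eq_map, List.map_cons, List.map_map, List.getD_cons_zero,
            List.zipWith3]
          refine congrArg (majc a b c :: ·) ?_
          rw [← ih p q r hp hq hr]
          apply List.map_congr_left
          intro k _
          simp [Function.comp]

lemma maj_nval : ∀ (p q r : List Char), p.length = q.length → q.length = r.length →
    nval (List.zipWith3 majc p q r) = M (nval p) (nval q) (nval r) := by
  intro p
  induction p with
  | nil =>
    intro q r hpq hqr
    cases q with
    | nil =>
      cases r with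
      | nil => simp [List.zipWith3, nval, M]
      | cons _ _ => simp at hqr
    | cons _ _ => simp at hpq
  | cons a p ih =>
    intro q r hpq hqr
    cases q with
    | nil => simp at hpq
    | cons b q =>
      cases r with
      | nil => simp at hqr
      | cons c r =>
        simp only [List.length_cons, Nat.add_right_cancel_iff] at hpq hqr
        have hz : (List.zipWith3 majc p q r).length = p.length := by
          rw [← map_range_eq_zipWith3 p.length p q r rfl hpq.symm (by omega)]
          simp
        simp only [List.zipWith3]
        rw [nval_cons, nval_cons, nval_cons, nval_cons, hz, hpq, hqr, ih q r hpq hqr, dig_majc]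
        have h1 : nval p < 2 ^ r.length := by rw [← hqr, ← hpq]; exact nval_lt p
        have h2 : nval q < 2 ^ r.length := by rw [← hqr]; exact nval_lt q
        have h3 : nval r < 2 ^ r.length := nval_lt r
        rw [maj_split h1 h2 h3]

lemma length_ljustTake (cs : List Char) (n : Nat) (c : Char) : (ljustTake cs n c).length = n := by
  unfold ljustTake
  simp only [List.length_take, List.length_append, List.length_replicate]
  omega

lemma core (l : List Char) (hl : l.length = 48) :
    int2 ((PySem.List.pyRange 0 16 1).foldl (fun acc i =>
        acc ++ [if 2 ≤ (([PySem.List.slice l (some 0) (some 16),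
                          PySem.List.slice l (some 16) (some 32),
                          PySem.List.slice l (some 32) (some 48)].map
                            (fun p => PySem.List.pyGetD p i ' ')).count '1') then '1' else '0'])
        ([] : List Char))
      = pyIntOr (pyIntOr (pyIntAnd (int2 (PySem.List.slice l (some 0) (some 16)))
                                   (int2 (PySem.List.slice l (some 16) (some 32))))
                         (pyIntAnd (int2 (PySem.List.slice l (some 16) (some 32)))
                                   (int2 (PySem.List.slice l (some 32) (some 48)))))
                (pyIntAnd (int2 (PySem.List.slice l (some 0) (some 16)))
                          (int2 (PySem.List.slice l (some 32) (some 48)))) := by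
  set p := PySem.List.slice l (some 0) (some 16) with hp
  set q := PySem.List.slice l (some 16) (some 32) with hq
  set r := PySem.List.slice l (some 32) (some 48) with hr
  have hpl : p.length = 16 := by
    rw [hp]
    have : ((0 : Int)) = ((0 : Nat) : Int) := rfl
    rw [this]
    have : ((16 : Int)) = ((16 : Nat) : Int) := rfl
    rw [this, PySem.List.slice_natCast]
    simp [hl]
  have hql : q.length = 16 := by
    rw [hq]
    have : ((16 : Int)) = ((16 : Nat) : Int) := rfl
    rw [this]
    have : ((32 : Int)) = ((32 : Nat) : Int) := rfl
    rw [this, PySem.List.slice_natCast]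
    simp [hl]
  have hrl : r.length = 16 := by
    rw [hr]
    have : ((32 : Int)) = ((32 : Nat) : Int) := rfl
    rw [this]
    have : ((48 : Int)) = ((48 : Nat) : Int) := rfl
    rw [this, PySem.List.slice_natCast]
    simp [hl]
  have hfold :
      (PySem.List.pyRange 0 16 1).foldl (fun acc i =>
          acc ++ [if 2 ≤ (([p, q, r].map (fun s => PySem.List.pyGetD s i ' ')).count '1')
                  then '1' else '0']) ([] : List Char)
        = (PySem.List.pyRange 0 16 1).map (fun i =>
            majc (PySem.List.pyGetD p i ' ') (PySem.List.pyGetD q i ' ')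
                 (PySem.List.pyGetD r i ' ')) := by
    rw [PySem.List.foldl_append_singleton_eq_map]
    simp [majc, List.map_cons]
  rw [hfold, PySem.List.pyRange_one]
  have h16 : ((16 : Int) - 0).toNat = 16 := by decide
  rw [h16, List.map_map]
  have hmr : ((fun i => majc (PySem.List.pyGetD p i ' ') (PySem.List.pyGetD q i ' ')
                (PySem.List.pyGetD r i ' ')) ∘ fun k : Nat => (0 : Int) + k)
      = fun k : Nat => majc (p.getD k ' ') (q.getD k ' ') (r.getD k ' ') := by
    funext k
    simp [Function.comp, PySem.List.pyGetD_natCast]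
  rw [hmr, map_range_eq_zipWith3 16 p q r hpl hql hrl]
  rw [int2_eq_nval, int2_eq_nval, int2_eq_nval, int2_eq_nval,
      maj_nval p q r (by omega) (by omega)]
  unfold M
  simp [pyIntAnd, pyIntOr]
  rfl

-- ===== VERDICT (by name: the statement is the Claim_ definition above) =====
theorem recover_length_from_header_spec : Claim_equal_recover_length_from_header := by
  unfold Claim_equal_recover_length_from_header
  intro s _
  unfold Spec_recover_length_from_header recover_length_from_header recover_length_from_header_alt
  exact core _ (length_ljustTake _ 48 '0')
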